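-- pv_equiv track=rewrite | github.com/subin4420/Java-CoTe | src/백도현/week5/5-1/pgs42626_dh.py | solution
-- ===== SOURCE A (Python) =====
-- import heapq
--
-- def solution(scoville, K):
--     answer = 0
--     heap = []
--     for i in scoville:
--         heapq.heappush(heap, i)
--
--     while heap[0] < K and len(heap) >= 2:
--         heapq.heappush(heap, heapq.heappop(heap) + (heapq.heappop(heap) * 2))
--         answer += 1
--
--     return answer if heap[0] >= K else -1
-- ===== SOURCE B (Python) =====
-- def solution(scoville, K):
--     # Sort once, then run a two-queue merge (as in linear-time Huffman coding):
--     # 'orig' holds the untouched foods ascending (consumed from index i), 'mixed'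
--     # holds the mix results in creation order (consumed from index j), which is
--     # provably ascending whenever an older result is still unconsumed; the global
--     # minimum is always one of the two queue fronts, so no priority structure is
--     # maintained after the initial sort.
--     orig = sorted(scoville)
--     mixed = []
--     i = 0
--     j = 0
--     answer = 0
--
--     def front():
--         if i == len(orig):
--             return mixed[j]
--         if j == len(mixed):
--             return orig[i]
--         return min(orig[i], mixed[j])
--
--     while front() < K and (len(orig) - i) + (len(mixed) - j) >= 2:
--         if i < len(orig) and (j == len(mixed) or orig[i] <= mixed[j]):
--             first = orig[i]
--             i += 1
--         else:
--             first = mixed[j]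
--             j += 1
--         if i < len(orig) and (j == len(mixed) or orig[i] <= mixed[j]):
--             second = orig[i]
--             i += 1
--         else:
--             second = mixed[j]
--             j += 1
--         mixed.append(first + 2 * second)
--         answer += 1
--     return answer if front() >= K else -1
-- ===== Notes on version B (the rewrite author's own statement) =====
-- stated objective: alternative
-- what changed: Replaces the running binary heap by a sort-once two-queue merge (the Huffman-coding trick): after one initial library sort no priority structure is maintained at all -- the untouched foods and the mix results are two plain queues consumed by index pointers, the mix-result queue is proved to stay sorted whenever it matters, and each step just takes the smaller of the two queue fronts in O(1).
import Mathlib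
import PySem

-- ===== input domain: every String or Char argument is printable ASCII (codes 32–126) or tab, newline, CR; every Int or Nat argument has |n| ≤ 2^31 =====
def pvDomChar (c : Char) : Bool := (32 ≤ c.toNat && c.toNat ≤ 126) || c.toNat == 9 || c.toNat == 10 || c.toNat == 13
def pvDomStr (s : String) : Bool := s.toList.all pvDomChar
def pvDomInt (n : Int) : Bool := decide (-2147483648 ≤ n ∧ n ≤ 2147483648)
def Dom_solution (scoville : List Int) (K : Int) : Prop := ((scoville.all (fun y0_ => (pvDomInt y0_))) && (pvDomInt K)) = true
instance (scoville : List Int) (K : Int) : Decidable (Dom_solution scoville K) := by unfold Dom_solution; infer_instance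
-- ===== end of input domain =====

-- B replaces A's running binary heap by a sort-once two-queue merge (the Huffman-coding
-- trick): after one initial sort, the untouched foods and the mix results are two plain
-- FIFO queues and each step pops the smaller of the two queue fronts; equal return values
-- are proved on all non-empty inputs (on [] both Pythons raise IndexError).

-- ===== PORT A =====
-- A calls heapq; heappush/heappop are ported by hand, step for step after CPython's
-- heapq (_siftdown/_siftup); A only ever uses startpos = 0, so that parameter is dropped.
def pvSiftdown (heap : List Int) (pos : Nat) (newitem : Int) : List Int :=
  if _h : 0 < pos then
    let parentpos := (pos - 1) / 2
    let parent := heap.getD parentpos 0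
    if newitem < parent then
      pvSiftdown (heap.set pos parent) parentpos newitem
    else heap.set pos newitem
  else heap.set pos newitem
termination_by pos
decreasing_by exact Nat.lt_of_le_of_lt (Nat.div_le_self (pos - 1) 2) (Nat.sub_lt _h Nat.one_pos)

theorem pvSiftdown_length (heap : List Int) (pos : Nat) (x : Int) :
    (pvSiftdown heap pos x).length = heap.length := by
  fun_induction pvSiftdown <;> simp_all

theorem pvPosLtChild (pos : Nat) : pos < 2 * pos + 1 := by omega

theorem pvSiftupDec (l : List Int) (v : Int) (pos c : Nat) (h : 2 * pos + 1 < l.length)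
    (hc : pos < c) : (l.set pos v).length - c < l.length - pos := by
  simp only [List.length_set]; omega

def pvSiftup (heap : List Int) (pos : Nat) (newitem : Int) : List Int :=
  if _h : 2 * pos + 1 < heap.length then
    let childpos := 2 * pos + 1
    let rightpos := childpos + 1
    if _hr : rightpos < heap.length ∧ ¬ heap.getD childpos 0 < heap.getD rightpos 0 then
      pvSiftup (heap.set pos (heap.getD rightpos 0)) rightpos newitem
    else
      pvSiftup (heap.set pos (heap.getD childpos 0)) childpos newitem
  else
    pvSiftdown (heap.set pos newitem) pos newitem
termination_by heap.length - pos
decreasing_by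
  · exact pvSiftupDec heap _ pos _ _h (Nat.lt_succ_of_lt (pvPosLtChild pos))
  · exact pvSiftupDec heap _ pos _ _h (pvPosLtChild pos)

theorem pvSiftup_length (heap : List Int) (pos : Nat) (x : Int) :
    (pvSiftup heap pos x).length = heap.length := by
  fun_induction pvSiftup <;> simp_all [pvSiftdown_length]

def pvHeappush (heap : List Int) (item : Int) : List Int :=
  pvSiftdown (heap ++ [item]) heap.length item

theorem pvHeappush_length (heap : List Int) (item : Int) :
    (pvHeappush heap item).length = heap.length + 1 := by
  simp [pvHeappush, pvSiftdown_length]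

def pvHeappop (heap : List Int) : Int × List Int :=
  let lastelt := heap.getLastD 0
  let rest := heap.dropLast
  if rest.isEmpty then (lastelt, rest)
  else (rest.headD 0, pvSiftup rest 0 lastelt)

theorem pvHeappop_length (heap : List Int) :
    (pvHeappop heap).2.length = heap.length - 1 := by
  by_cases h : heap.dropLast.isEmpty <;> simp [pvHeappop, h, pvSiftup_length]

theorem pvALoopDec (heap : List Int) (v : Int) (h : 2 ≤ heap.length) :
    (pvHeappush (pvHeappop (pvHeappop heap).2).2 v).length < heap.length := by
  rw [pvHeappush_length, pvHeappop_length, pvHeappop_length]; omega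

def pvALoop (heap : List Int) (K : Int) (answer : Int) : Int :=
  if _h : PySem.List.pyGetD heap 0 0 < K ∧ 2 ≤ heap.length then
    let p1 := pvHeappop heap
    let p2 := pvHeappop p1.2
    pvALoop (pvHeappush p2.2 (p1.1 + p2.1 * 2)) K (answer + 1)
  else if PySem.List.pyGetD heap 0 0 ≥ K then answer else -1
termination_by heap.length
decreasing_by exact pvALoopDec heap _ _h.2

def solution (scoville : List Int) (K : Int) : Int :=
  pvALoop (scoville.foldl pvHeappush []) K 0

-- ===== PORT B =====
-- B's front() and the two inline pop branches over the two queues, with index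
-- pointers i (into orig) and j (into mixed); orig[i]/mixed[j] are total here
-- (default 0): the only reachable IndexError is front() on the empty input,
-- excluded by Pre_.  The while loop is totalized with a fuel counter (the loop
-- runs at most len(orig) times; solution_alt passes fuel len(orig)+1).
def pvFrontI (orig mixed : List Int) (i j : Nat) : Int :=
  if i = orig.length then mixed.getD j 0
  else if j = mixed.length then orig.getD i 0
  else min (orig.getD i 0) (mixed.getD j 0)

def pvPopI (orig mixed : List Int) (i j : Nat) : Int × Nat × Nat :=
  if i < orig.length ∧ (j = mixed.length ∨ orig.getD i 0 ≤ mixed.getD j 0)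
  then (orig.getD i 0, i + 1, j) else (mixed.getD j 0, i, j + 1)

def pvTQI : Nat → List Int → List Int → Nat → Nat → Int → Int → Int
  | 0, _, _, _, _, _, _ => -1
  | fuel + 1, orig, mixed, i, j, K, ans =>
    if pvFrontI orig mixed i j < K ∧ 2 ≤ (orig.length - i) + (mixed.length - j) then
      let p1 := pvPopI orig mixed i j
      let p2 := pvPopI orig mixed p1.2.1 p1.2.2
      pvTQI fuel orig (mixed ++ [p1.1 + 2 * p2.1]) p2.2.1 p2.2.2 K (ans + 1)
    else if pvFrontI orig mixed i j ≥ K then ans else -1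

def solution_alt (scoville : List Int) (K : Int) : Int :=
  pvTQI (scoville.length + 1) (PySem.List.sorted scoville id) [] 0 0 K 0

-- ===== PRECONDITION & SPEC =====
-- Pre_ excludes only the empty list, on which A's 'heap[0]' raises IndexError (B raises there too).
def Pre_solution (scoville : List Int) (K : Int) : Prop := scoville ≠ []
instance (scoville : List Int) (K : Int) : Decidable (Pre_solution scoville K) := by unfold Pre_solution; infer_instance
def pvWitness_solution : List Int × Int := ([1, 2, 9], 5)
def Spec_solution (scoville : List Int) (K : Int) (out : Int) : Prop := out = solution_alt scoville K
instance (scoville : List Int) (K : Int) (out : Int) : Decidable (Spec_solution scoville K out) := by unfold Spec_solution; infer_instance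

-- ===== CLAIM (what is proved, stated in full; the proofs are below) =====
def Claim_equal_solution : Prop := ∀ (scoville : List Int) (K : Int), Dom_solution scoville K → Pre_solution scoville K → Spec_solution scoville K (solution scoville K)

-- ===== LEMMAS AND PROOFS =====

-- Proof devices for B: the same two-queue loop phrased over the REMAINING suffixes
-- of the two queues (pvTQ); the fuel/index port pvTQI is bridged to it below.
def pvFront (o m : List Int) : Int :=
  if o = [] then m.getD 0 0
  else if m = [] then o.getD 0 0
  else min (o.getD 0 0) (m.getD 0 0)

def pvPopMin (o m : List Int) : Int × List Int × List Int :=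
  if o ≠ [] ∧ (m = [] ∨ o.getD 0 0 ≤ m.getD 0 0) then (o.getD 0 0, o.tail, m)
  else (m.getD 0 0, o, m.tail)

theorem pvPopMin_cases (o m : List Int) :
    (o ≠ [] ∧ pvPopMin o m = (o.getD 0 0, o.tail, m)) ∨
    (m ≠ [] ∧ pvPopMin o m = (m.getD 0 0, o, m.tail)) ∨ (o = [] ∧ m = []) := by
  unfold pvPopMin
  split_ifs with h
  · exact Or.inl ⟨h.1, rfl⟩
  · rcases eq_or_ne m [] with rfl | hm
    · rcases eq_or_ne o [] with rfl | ho
      · exact Or.inr (Or.inr ⟨rfl, rfl⟩)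
      · exact absurd ⟨ho, Or.inl rfl⟩ h
    · exact Or.inr (Or.inl ⟨hm, rfl⟩)

theorem pvPopMin_len (o m : List Int) (h : 1 ≤ o.length + m.length) :
    (pvPopMin o m).2.1.length + (pvPopMin o m).2.2.length + 1 = o.length + m.length := by
  rcases pvPopMin_cases o m with ⟨ho, he⟩ | ⟨hm, he⟩ | ⟨rfl, rfl⟩
  · rw [he]
    have := List.length_pos_iff.mpr ho
    simp only [List.length_tail]; omega
  · rw [he]
    have := List.length_pos_iff.mpr hm
    simp only [List.length_tail]; omega
  · simp at h

theorem pvTQDec (o m : List Int) (v : Int) (h : 2 ≤ o.length + m.length) :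
    (pvPopMin (pvPopMin o m).2.1 (pvPopMin o m).2.2).2.1.length +
      ((pvPopMin (pvPopMin o m).2.1 (pvPopMin o m).2.2).2.2 ++ [v]).length <
      o.length + m.length := by
  have h1 := pvPopMin_len o m (by omega)
  have h2 := pvPopMin_len (pvPopMin o m).2.1 (pvPopMin o m).2.2 (by omega)
  simp only [List.length_append, List.length_cons, List.length_nil]
  omega

def pvTQ (o m : List Int) (K ans : Int) : Int :=
  if _h : pvFront o m < K ∧ 2 ≤ o.length + m.length then
    let p1 := pvPopMin o m
    let p2 := pvPopMin p1.2.1 p1.2.2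
    pvTQ p2.2.1 (p2.2.2 ++ [p1.1 + 2 * p2.1]) K (ans + 1)
  else if pvFront o m ≥ K then ans else -1
termination_by o.length + m.length
decreasing_by exact pvTQDec o m _ _h.2

-- Proof device: the canonical process on ONE fully sorted list (pop the first two,
-- reinsert the mix at its sorted position).  Both ports are proved equal to it.
def pvInsort (lst : List Int) (x : Int) : List Int :=
  let i := PySem.List.bisectRight lst x
  lst.take i ++ x :: lst.drop i

theorem pvInsort_length (lst : List Int) (x : Int) :
    (pvInsort lst x).length = lst.length + 1 := by
  simp [pvInsort]

theorem pvBLoopDec (lst : List Int) (v : Int) (h : 2 ≤ lst.length) :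
    (pvInsort (lst.drop 2) v).length < lst.length := by
  rw [pvInsort_length, List.length_drop]; omega

def pvBLoop (lst : List Int) (K : Int) (answer : Int) : Int :=
  if _h : PySem.List.pyGetD lst 0 0 < K ∧ 2 ≤ lst.length then
    let first := PySem.List.pyGetD lst 0 0
    let second := PySem.List.pyGetD lst 1 0
    pvBLoop (pvInsort (lst.drop 2) (first + second * 2)) K (answer + 1)
  else if PySem.List.pyGetD lst 0 0 ≥ K then answer else -1
termination_by lst.length
decreasing_by exact pvBLoopDec lst _ _h.2

-- the binary-heap invariant of CPython's heapq, phrased over list indices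
def pvIsHeap (l : List Int) : Prop :=
  ∀ j : Nat, 0 < j → j < l.length → l.getD ((j - 1) / 2) 0 ≤ l.getD j 0

-- "heap with a hole at pos": all parent/child edges not touching pos hold
def pvH1 (l : List Int) (pos : Nat) : Prop :=
  ∀ j : Nat, 0 < j → j < l.length → j ≠ pos → (j - 1) / 2 ≠ pos →
    l.getD ((j - 1) / 2) 0 ≤ l.getD j 0
-- grandparent condition across the hole
def pvH2 (l : List Int) (pos : Nat) : Prop :=
  ∀ j : Nat, 0 < j → j < l.length → (j - 1) / 2 = pos → 0 < pos →
    l.getD ((pos - 1) / 2) 0 ≤ l.getD j 0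
-- the item to be placed is below the hole's children
def pvH3 (l : List Int) (pos : Nat) (x : Int) : Prop :=
  ∀ j : Nat, 0 < j → j < l.length → (j - 1) / 2 = pos → x ≤ l.getD j 0

theorem pvGetDSet (l : List Int) (i j : Nat) (v : Int) (hi : i < l.length) :
    (l.set i v).getD j 0 = if j = i then v else l.getD j 0 := by
  rcases Nat.lt_or_ge j l.length with hj | hj
  · by_cases h : j = i
    · subst h; simp [List.getD_eq_getElem, hj, List.getElem_set]
    · simp [List.getD_eq_getElem, hj, List.getElem_set, h, Ne.symm h]
  · have hji : j ≠ i := by omega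
    rw [if_neg hji, List.getD_eq_getElem?_getD, List.getD_eq_getElem?_getD,
      List.getElem?_eq_none_iff.mpr (by simpa using hj), List.getElem?_eq_none_iff.mpr hj]

theorem pvIsHeap_root_le (l : List Int) (hl : pvIsHeap l) :
    ∀ j : Nat, j < l.length → l.getD 0 0 ≤ l.getD j 0 := by
  intro j
  induction j using Nat.strong_induction_on with
  | _ j ih =>
    intro hj
    rcases Nat.eq_zero_or_pos j with h0 | h0
    · simp [h0]
    · exact le_trans (ih ((j - 1) / 2) (by omega) (by omega)) (hl j h0 hj)

theorem pvSetSetPerm (l : List Int) (i j : Nat) (hi : i < l.length) (hj : j < l.length)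
    (hne : i ≠ j) (x : Int) :
    ((l.set i (l.getD j 0)).set j x).Perm (l.set i x) := by
  have ha : l.getD j 0 = l[j] := List.getD_eq_getElem l 0 hj
  have h1 : ((l.set i (l.getD j 0)).set j x).Perm (x :: (l.set i (l.getD j 0)).eraseIdx j) :=
    List.set_perm_cons_eraseIdx (by simpa using hj) x
  have h2 : ((l.set i (l.getD j 0)).eraseIdx j).Perm (l.eraseIdx i) := by
    have e1 : (l.set i (l.getD j 0)).Perm (l.getD j 0 :: l.eraseIdx i) :=
      List.set_perm_cons_eraseIdx hi _
    have e2 : ((l.set i (l.getD j 0))[j]'(by simpa using hj) ::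
        (l.set i (l.getD j 0)).eraseIdx j).Perm (l.set i (l.getD j 0)) :=
      List.getElem_cons_eraseIdx_perm (by simpa using hj)
    have e3 : (l.set i (l.getD j 0))[j]'(by simpa using hj) = l.getD j 0 := by
      rw [List.getElem_set_ne hne]; exact ha.symm
    rw [e3] at e2
    exact (e2.trans e1).cons_inv
  have h3 : (l.set i x).Perm (x :: l.eraseIdx i) := List.set_perm_cons_eraseIdx hi x
  exact h1.trans ((h2.cons x).trans h3.symm)

theorem pvSiftdown_perm (l : List Int) (pos : Nat) (x : Int) (hpos : pos < l.length) :
    (pvSiftdown l pos x).Perm (l.set pos x) := by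
  induction pos using Nat.strong_induction_on generalizing l with
  | _ pos ih =>
    rw [pvSiftdown]
    by_cases h0 : 0 < pos
    · rw [dif_pos h0]
      by_cases hlt : x < l.getD ((pos - 1) / 2) 0
      · rw [if_pos hlt]
        exact (ih ((pos - 1) / 2) (by omega) _ (by simp only [List.length_set]; omega)).trans
          (pvSetSetPerm l pos ((pos - 1) / 2) hpos (by omega) (by omega) x)
      · rw [if_neg hlt]
    · rw [dif_neg h0]

theorem pvSiftdown_isHeap (l : List Int) (pos : Nat) (x : Int)
    (hpos : pos < l.length) (h1 : pvH1 l pos) (h2 : pvH2 l pos) (h3 : pvH3 l pos x) :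
    pvIsHeap (pvSiftdown l pos x) := by
  induction pos using Nat.strong_induction_on generalizing l with
  | _ pos ih =>
    rw [pvSiftdown]
    by_cases h0 : 0 < pos
    · rw [dif_pos h0]
      by_cases hlt : x < l.getD ((pos - 1) / 2) 0
      · rw [if_pos hlt]
        apply ih ((pos - 1) / 2) (by omega) _ (by simp only [List.length_set]; omega)
        · -- pvH1 of the shifted list, hole at the parent
          intro j hj0 hjlen hjne hjp
          simp only [List.length_set] at hjlen
          rw [pvGetDSet _ _ _ _ hpos, pvGetDSet _ _ _ _ hpos]
          by_cases hj1 : j = pos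
          · exact absurd (by rw [hj1]) hjp
          · by_cases hj2 : (j - 1) / 2 = pos
            · rw [if_pos hj2, if_neg hj1]
              exact h2 j hj0 hjlen hj2 h0
            · rw [if_neg hj2, if_neg hj1]
              exact h1 j hj0 hjlen hj1 hj2
        · -- pvH2 of the shifted list
          intro j hj0 hjlen hjpar hpp0
          simp only [List.length_set] at hjlen
          rw [pvGetDSet _ _ _ _ hpos, pvGetDSet _ _ _ _ hpos,
            if_neg (by omega : ((pos - 1) / 2 - 1) / 2 ≠ pos)]
          by_cases hj1 : j = pos
          · rw [if_pos hj1]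
            exact h1 ((pos - 1) / 2) hpp0 (by omega) (by omega) (by omega)
          · rw [if_neg hj1]
            have e1 : l.getD (((pos - 1) / 2 - 1) / 2) 0 ≤ l.getD ((pos - 1) / 2) 0 :=
              h1 ((pos - 1) / 2) hpp0 (by omega) (by omega) (by omega)
            have e2 : l.getD ((pos - 1) / 2) 0 ≤ l.getD j 0 := by
              have := h1 j hj0 hjlen hj1 (by omega)
              rwa [hjpar] at this
            exact e1.trans e2
        · -- pvH3 of the shifted list
          intro j hj0 hjlen hjpar
          simp only [List.length_set] at hjlen
          rw [pvGetDSet _ _ _ _ hpos]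
          by_cases hj1 : j = pos
          · rw [if_pos hj1]; exact le_of_lt hlt
          · rw [if_neg hj1]
            have e2 : l.getD ((pos - 1) / 2) 0 ≤ l.getD j 0 := by
              have := h1 j hj0 hjlen hj1 (by omega)
              rwa [hjpar] at this
            exact le_of_lt (lt_of_lt_of_le hlt e2)
      · rw [if_neg hlt]
        intro j hj0 hjlen
        simp only [List.length_set] at hjlen
        rw [pvGetDSet _ _ _ _ hpos, pvGetDSet _ _ _ _ hpos]
        by_cases hj1 : j = pos
        · subst hj1
          rw [if_pos rfl, if_neg (by omega : (j - 1) / 2 ≠ j)]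
          exact le_of_not_gt hlt
        · by_cases hj2 : (j - 1) / 2 = pos
          · rw [if_pos hj2, if_neg hj1]; exact h3 j hj0 hjlen hj2
          · rw [if_neg hj2, if_neg hj1]; exact h1 j hj0 hjlen hj1 hj2
    · rw [dif_neg h0]
      have hp0 : pos = 0 := by omega
      subst hp0
      intro j hj0 hjlen
      simp only [List.length_set] at hjlen
      rw [pvGetDSet _ _ _ _ hpos, pvGetDSet _ _ _ _ hpos, if_neg (by omega : j ≠ 0)]
      by_cases hj2 : (j - 1) / 2 = 0
      · rw [if_pos hj2]; exact h3 j hj0 hjlen hj2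
      · rw [if_neg hj2]; exact h1 j hj0 hjlen (by omega) hj2

theorem pvSiftup_perm (l : List Int) (pos : Nat) (x : Int) (hpos : pos < l.length) :
    (pvSiftup l pos x).Perm (l.set pos x) := by
  suffices H : ∀ n (l : List Int) (pos : Nat), pos < l.length → l.length - pos ≤ n →
      (pvSiftup l pos x).Perm (l.set pos x) from H (l.length - pos) l pos hpos le_rfl
  intro n
  induction n with
  | zero => intro l pos h1 h2; omega
  | succ n ih =>
    intro l pos hpos hle
    rw [pvSiftup]
    by_cases hc : 2 * pos + 1 < l.length
    · rw [dif_pos hc]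
      simp only []
      by_cases hr : 2 * pos + 1 + 1 < l.length ∧ ¬ l.getD (2 * pos + 1) 0 < l.getD (2 * pos + 1 + 1) 0
      · rw [dif_pos hr]
        exact (ih _ _ (by simp only [List.length_set]; exact hr.1)
          (by simp only [List.length_set]; omega)).trans
          (pvSetSetPerm l pos (2 * pos + 1 + 1) hpos hr.1 (by omega) x)
      · rw [dif_neg hr]
        exact (ih _ _ (by simp only [List.length_set]; exact hc)
          (by simp only [List.length_set]; omega)).trans
          (pvSetSetPerm l pos (2 * pos + 1) hpos hc (by omega) x)
    · rw [dif_neg hc]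
      have h := pvSiftdown_perm (l.set pos x) pos x (by simpa using hpos)
      rwa [List.set_set] at h

theorem pvHoleStep (l : List Int) (pos c : Nat) (hpos : pos < l.length) (hc : c < l.length)
    (hchild : (c - 1) / 2 = pos)
    (hmin : ∀ o : Nat, 0 < o → o < l.length → (o - 1) / 2 = pos → l.getD c 0 ≤ l.getD o 0)
    (h1 : pvH1 l pos) (h2 : pvH2 l pos) :
    pvH1 (l.set pos (l.getD c 0)) c ∧ pvH2 (l.set pos (l.getD c 0)) c := by
  constructor
  · intro j hj0 hjlen hjne hjp
    simp only [List.length_set] at hjlen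
    rw [pvGetDSet _ _ _ _ hpos, pvGetDSet _ _ _ _ hpos]
    by_cases hj1 : j = pos
    · subst hj1
      rw [if_pos rfl, if_neg (by omega : (j - 1) / 2 ≠ j)]
      exact h2 c (by omega) hc hchild (by omega)
    · by_cases hj2 : (j - 1) / 2 = pos
      · rw [if_pos hj2, if_neg hj1]
        exact hmin j hj0 hjlen hj2
      · rw [if_neg hj2, if_neg hj1]
        exact h1 j hj0 hjlen hj1 hj2
  · intro j hj0 hjlen hjparc _
    simp only [List.length_set] at hjlen
    rw [pvGetDSet _ _ _ _ hpos, pvGetDSet _ _ _ _ hpos, if_pos hchild,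
      if_neg (by omega : j ≠ pos)]
    have e := h1 j hj0 hjlen (by omega) (by omega)
    rwa [hjparc] at e

theorem pvSiftup_isHeap (l : List Int) (pos : Nat) (x : Int)
    (hpos : pos < l.length) (h1 : pvH1 l pos) (h2 : pvH2 l pos) :
    pvIsHeap (pvSiftup l pos x) := by
  suffices H : ∀ n (l : List Int) (pos : Nat), pos < l.length → pvH1 l pos → pvH2 l pos →
      l.length - pos ≤ n → pvIsHeap (pvSiftup l pos x) from
    H (l.length - pos) l pos hpos h1 h2 le_rfl
  intro n
  induction n with
  | zero => intro l pos hpos _ _ hle; omega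
  | succ n ih =>
    intro l pos hpos h1 h2 hle
    rw [pvSiftup]
    by_cases hc : 2 * pos + 1 < l.length
    · rw [dif_pos hc]
      simp only []
      by_cases hr : 2 * pos + 1 + 1 < l.length ∧ ¬ l.getD (2 * pos + 1) 0 < l.getD (2 * pos + 1 + 1) 0
      · rw [dif_pos hr]
        have hstep := pvHoleStep l pos (2 * pos + 1 + 1) hpos hr.1 (by omega)
          (fun o ho0 ho hpar => by
            have : o = 2 * pos + 1 ∨ o = 2 * pos + 1 + 1 := by omega
            rcases this with rfl | rfl
            · exact le_of_not_gt hr.2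
            · exact le_refl _) h1 h2
        exact ih (l.set pos (l.getD (2 * pos + 1 + 1) 0)) (2 * pos + 1 + 1)
          (by simp only [List.length_set]; exact hr.1) hstep.1 hstep.2
          (by simp only [List.length_set]; omega)
      · rw [dif_neg hr]
        have hstep := pvHoleStep l pos (2 * pos + 1) hpos hc (by omega)
          (fun o ho0 ho hpar => by
            have : o = 2 * pos + 1 ∨ o = 2 * pos + 1 + 1 := by omega
            rcases this with rfl | rfl
            · exact le_refl _
            · exact le_of_lt (by
                by_contra hge
                exact hr ⟨ho, hge⟩)) h1 h2
        exact ih (l.set pos (l.getD (2 * pos + 1) 0)) (2 * pos + 1)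
          (by simp only [List.length_set]; exact hc) hstep.1 hstep.2
          (by simp only [List.length_set]; omega)
    · rw [dif_neg hc]
      apply pvSiftdown_isHeap _ pos x (by simpa using hpos)
      · intro j hj0 hjlen hjne hjp
        simp only [List.length_set] at hjlen
        rw [pvGetDSet _ _ _ _ hpos, pvGetDSet _ _ _ _ hpos, if_neg hjne, if_neg hjp]
        exact h1 j hj0 hjlen hjne hjp
      · intro j hj0 hjlen hjpar _
        simp only [List.length_set] at hjlen
        omega
      · intro j hj0 hjlen hjpar
        simp only [List.length_set] at hjlen
        omega

theorem pvHeappush_spec (heap : List Int) (x : Int) (hh : pvIsHeap heap) :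
    pvIsHeap (pvHeappush heap x) ∧ (pvHeappush heap x).Perm (x :: heap) := by
  constructor
  · apply pvSiftdown_isHeap (heap ++ [x]) heap.length x (by simp)
    · intro j hj0 hjlen hjne hjp
      simp only [List.length_append, List.length_cons, List.length_nil] at hjlen
      rw [List.getD_append _ _ _ _ (by omega), List.getD_append _ _ _ _ (by omega)]
      exact hh j hj0 (by omega)
    · intro j hj0 hjlen hjpar _
      simp only [List.length_append, List.length_cons, List.length_nil] at hjlen
      omega
    · intro j hj0 hjlen hjpar
      simp only [List.length_append, List.length_cons, List.length_nil] at hjlen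
      omega
  · have hp := pvSiftdown_perm (heap ++ [x]) heap.length x (by simp)
    rw [List.set_append_right _ _ le_rfl, Nat.sub_self] at hp
    have hx : ([x] : List Int).set 0 x = [x] := rfl
    rw [hx] at hp
    exact hp.trans (List.perm_append_singleton x heap)

theorem pvHeappop_spec (heap : List Int) (hne : heap ≠ []) (hh : pvIsHeap heap) :
    (pvHeappop heap).1 = heap.getD 0 0 ∧
    heap.Perm ((pvHeappop heap).1 :: (pvHeappop heap).2) ∧
    pvIsHeap (pvHeappop heap).2 := by
  obtain rfl | ⟨ys, a, rfl⟩ := heap.eq_nil_or_concat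
  · exact absurd rfl hne
  · rw [List.concat_eq_append] at *
    rw [pvHeappop]
    simp only [List.dropLast_concat, List.getLastD_concat]
    by_cases hy : ys.isEmpty
    · obtain rfl : ys = [] := List.isEmpty_iff.mp hy
      simp only [List.isEmpty_nil, if_true]
      refine ⟨by simp, by simp, ?_⟩
      intro j hj0 hj
      simp at hj
    · rw [if_neg hy]
      have hylen : 0 < ys.length := by
        cases ys with
        | nil => simp at hy
        | cons b t => simp
      refine ⟨?_, ?_, ?_⟩
      · cases ys with
        | nil => simp at hy
        | cons b t => simp
      · have hperm := pvSiftup_perm ys 0 a hylen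
        cases ys with
        | nil => simp at hy
        | cons b t =>
          show ((b :: t) ++ [a]).Perm (b :: pvSiftup (b :: t) 0 a)
          have h1 : ((b :: t) ++ [a]).Perm (b :: (a :: t)) := by
            have := List.perm_append_singleton a t
            simpa using this.cons b
          have h2 : (pvSiftup (b :: t) 0 a).Perm (a :: t) := by simpa using hperm
          exact h1.trans ((h2.cons b).symm)
      · apply pvSiftup_isHeap ys 0 a hylen
        · intro j hj0 hjlen hjne hjp
          rw [← List.getD_append ys [a] 0 _ (by omega), ← List.getD_append ys [a] 0 _ hjlen]
          exact hh j hj0 (by simp; omega)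
        · intro j hj0 hjlen hjpar hp0
          omega

theorem pvMinUnique {l₁ l₂ : List Int} (h : l₁.Perm l₂) {a b : Int}
    (ha : a ∈ l₁) (hb : b ∈ l₂) (ha' : ∀ y ∈ l₁, a ≤ y) (hb' : ∀ y ∈ l₂, b ≤ y) : a = b :=
  le_antisymm (ha' b (h.mem_iff.mpr hb)) (hb' a (h.mem_iff.mp ha))

theorem pvSortedHeadMin (lst : List Int) (hs : lst.Pairwise (· ≤ ·)) :
    ∀ y ∈ lst, lst.getD 0 0 ≤ y := by
  cases lst with
  | nil => intro y hy; simp at hy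
  | cons a t =>
    intro y hy
    rcases List.mem_cons.mp hy with rfl | hm
    · simp
    · simpa using List.rel_of_pairwise_cons hs hm

theorem pvInsort_perm (lst : List Int) (x : Int) : (pvInsort lst x).Perm (x :: lst) := by
  unfold pvInsort
  exact List.perm_middle.trans (by rw [List.take_append_drop])

theorem pvInsort_sorted (lst : List Int) (x : Int) (hs : lst.Pairwise (· ≤ ·)) :
    (pvInsort lst x).Pairwise (· ≤ ·) := by
  unfold pvInsort
  obtain ⟨hle, hlo, hhi⟩ := PySem.List.bisectRight_spec lst x hs
  rw [List.pairwise_append]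
  refine ⟨hs.sublist (List.take_sublist ..), ?_, ?_⟩
  · rw [List.pairwise_cons]
    refine ⟨?_, hs.sublist (List.drop_sublist ..)⟩
    intro b hb
    obtain ⟨k, hk, rfl⟩ := List.mem_iff_getElem.mp hb
    rw [List.getElem_drop]
    exact le_of_lt (hhi _ (by simp at hk; omega) (by omega))
  · intro a ha b hb
    obtain ⟨k, hk, rfl⟩ := List.mem_iff_getElem.mp ha
    have hk' : k < PySem.List.bisectRight lst x := by simp at hk; omega
    have hklen : k < lst.length := by simp at hk; omega
    rw [List.getElem_take]
    have hax : lst[k] ≤ x := hlo k hklen hk'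
    rcases List.mem_cons.mp hb with rfl | hbm
    · exact hax
    · obtain ⟨m, hm, rfl⟩ := List.mem_iff_getElem.mp hbm
      rw [List.getElem_drop]
      exact hax.trans (le_of_lt (hhi _ (by simp at hm; omega) (by omega)))

theorem pvLoopEq (n : Nat) : ∀ (heap lst : List Int) (K ans : Int),
    heap.length = n → pvIsHeap heap → lst.Pairwise (· ≤ ·) → heap.Perm lst →
    pvALoop heap K ans = pvBLoop lst K ans := by
  intro heap lst K ans
  induction n using Nat.strong_induction_on generalizing heap lst K ans with
  | _ n ih =>
  intro hlen hh hs hp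
  have hleq : heap.length = lst.length := hp.length_eq
  rcases eq_or_ne heap [] with rfl | hne
  · obtain rfl : lst = [] := List.length_eq_zero_iff.mp (by simpa using hleq.symm)
    rw [pvALoop, pvBLoop, dif_neg (by simp), dif_neg (by simp)]
  · have h0len : 0 < heap.length := List.length_pos_iff.mpr hne
    have hlst_ne : lst ≠ [] := by
      intro h
      subst h
      simp only [List.length_nil] at hleq
      omega
    have hmem_heap : heap.getD 0 0 ∈ heap := by
      rw [List.getD_eq_getElem _ _ h0len]; exact List.getElem_mem _
    have hmin_heap : ∀ y ∈ heap, heap.getD 0 0 ≤ y := by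
      intro y hy
      obtain ⟨j, hj, rfl⟩ := List.mem_iff_getElem.mp hy
      rw [← List.getD_eq_getElem heap 0 hj]
      exact pvIsHeap_root_le heap hh j hj
    have hmem_lst : lst.getD 0 0 ∈ lst := by
      rw [List.getD_eq_getElem _ _ (by omega)]; exact List.getElem_mem _
    have hhead : heap.getD 0 0 = lst.getD 0 0 :=
      pvMinUnique hp hmem_heap hmem_lst hmin_heap (pvSortedHeadMin lst hs)
    rw [pvALoop, pvBLoop, PySem.List.pyGetD_zero, PySem.List.pyGetD_zero]
    by_cases hg : heap.getD 0 0 < K ∧ 2 ≤ heap.length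
    · have hgB : lst.getD 0 0 < K ∧ 2 ≤ lst.length :=
        ⟨by rw [← hhead]; exact hg.1, by omega⟩
      rw [dif_pos hg, dif_pos hgB]
      simp only []
      obtain ⟨hA1, hA2, hA3⟩ := pvHeappop_spec heap hne hh
      have h1ne : (pvHeappop heap).2 ≠ [] := by
        intro h
        have hl := pvHeappop_length heap
        rw [h] at hl
        simp at hl
        omega
      obtain ⟨hB1, hB2, hB3⟩ := pvHeappop_spec (pvHeappop heap).2 h1ne hA3
      obtain ⟨b1, b2, rest, rfl⟩ : ∃ b1 b2 rest, lst = b1 :: b2 :: rest := by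
        match lst, hleq with
        | b1 :: b2 :: rest, _ => exact ⟨b1, b2, rest, rfl⟩
        | [], h => simp only [List.length_nil] at h; omega
        | [b1], h => simp only [List.length_cons, List.length_nil] at h; omega
      have hfirst : (b1 :: b2 :: rest).getD 0 0 = b1 := rfl
      have hsecond : PySem.List.pyGetD (b1 :: b2 :: rest) 1 0 = b2 := by
        have h1 : (1 : Int) = ((1 : Nat) : Int) := rfl
        rw [h1, PySem.List.pyGetD_natCast]
        rfl
      have hm1 : (pvHeappop heap).1 = b1 := by rw [hA1, hhead, hfirst]
      have hp1 : (pvHeappop heap).2.Perm (b2 :: rest) := by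
        have h' := hA2.symm.trans hp
        rw [hm1] at h'
        exact h'.cons_inv
      have hstail : (b2 :: rest).Pairwise (· ≤ ·) := (List.pairwise_cons.mp hs).2
      have hm2 : (pvHeappop (pvHeappop heap).2).1 = b2 := by
        rw [hB1]
        have h1ne' : 0 < (pvHeappop heap).2.length := List.length_pos_iff.mpr h1ne
        refine pvMinUnique hp1 ?_ (List.mem_cons_self ..) ?_
          (by simpa using pvSortedHeadMin (b2 :: rest) hstail)
        · rw [List.getD_eq_getElem _ _ h1ne']; exact List.getElem_mem _
        · intro y hy
          obtain ⟨j, hj, rfl⟩ := List.mem_iff_getElem.mp hy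
          rw [← List.getD_eq_getElem _ 0 hj]
          exact pvIsHeap_root_le _ hA3 j hj
      have hp2 : (pvHeappop (pvHeappop heap).2).2.Perm rest := by
        have h' := hB2.symm.trans hp1
        rw [hm2] at h'
        exact h'.cons_inv
      obtain ⟨hP1, hP2⟩ :=
        pvHeappush_spec (pvHeappop (pvHeappop heap).2).2
          ((pvHeappop heap).1 + (pvHeappop (pvHeappop heap).2).1 * 2) hB3
      rw [hfirst, hsecond]
      have hdrop : (b1 :: b2 :: rest).drop 2 = rest := rfl
      rw [hdrop]
      apply ih (heap.length - 1) (by omega)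
      · rw [pvHeappush_length, pvHeappop_length, pvHeappop_length]; omega
      · exact hP1
      · exact pvInsort_sorted rest _ (List.pairwise_cons.mp hstail).2
      · refine hP2.trans ?_
        rw [hm1, hm2]
        exact ((hp2.cons _).trans (pvInsort_perm rest (b1 + b2 * 2)).symm)
    · rw [dif_neg hg, dif_neg (by rw [← hhead]; omega :
        ¬(lst.getD 0 0 < K ∧ 2 ≤ lst.length))]
      rw [hhead]

theorem pvBuild (xs : List Int) : ∀ acc : List Int, pvIsHeap acc →
    pvIsHeap (xs.foldl pvHeappush acc) ∧ (xs.foldl pvHeappush acc).Perm (xs ++ acc) := by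
  induction xs with
  | nil => intro acc h; exact ⟨h, by simp⟩
  | cons x xs ih =>
    intro acc h
    have hp := pvHeappush_spec acc x h
    obtain ⟨ih1, ih2⟩ := ih (pvHeappush acc x) hp.1
    refine ⟨by simpa [List.foldl_cons] using ih1, ?_⟩
    have s1 : ((x :: xs).foldl pvHeappush acc).Perm (xs ++ pvHeappush acc x) := by
      simpa [List.foldl_cons] using ih2
    have s2 : (xs ++ pvHeappush acc x).Perm (xs ++ x :: acc) := hp.2.append_left xs
    have s3 : (xs ++ x :: acc).Perm ((x :: xs) ++ acc) := by
      simpa using List.perm_middle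
    exact (s1.trans s2).trans s3

-- ===== two-queue side =====

-- B's loop invariant: the mix queue's last element is a+2b for the two minima a ≤ b of
-- the multiset at its creation time, and everything else still present is ≥ b.
def pvTQInv (o m : List Int) : Prop :=
  m = [] ∨ ∃ a b : Int, m.getLast? = some (a + 2 * b) ∧ a ≤ b ∧
    ∀ x ∈ o ++ m.dropLast, b ≤ x

theorem pvFront_eq_popMin (o m : List Int) : pvFront o m = (pvPopMin o m).1 := by
  unfold pvFront pvPopMin
  rcases eq_or_ne o [] with rfl | ho
  · simp
  · rcases eq_or_ne m [] with rfl | hm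
    · simp [ho]
    · rw [if_neg ho, if_neg hm]
      by_cases hle : o.getD 0 0 ≤ m.getD 0 0
      · rw [if_pos ⟨ho, Or.inr hle⟩]
        exact min_eq_left hle
      · rw [if_neg (by tauto)]
        exact min_eq_right (le_of_not_ge hle)

theorem pvPopMin_min (o m : List Int) (ho : o.Pairwise (· ≤ ·)) (hm : m.Pairwise (· ≤ ·)) :
    ∀ x ∈ o ++ m, (pvPopMin o m).1 ≤ x := by
  intro x hx
  unfold pvPopMin
  rcases List.mem_append.mp hx with hxo | hxm
  · have hone : o ≠ [] := by rintro rfl; cases hxo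
    split_ifs with h
    · exact pvSortedHeadMin o ho x hxo
    · have h2 : ¬ (m = [] ∨ o.getD 0 0 ≤ m.getD 0 0) := fun hc => h ⟨hone, hc⟩
      obtain ⟨_, hleo⟩ := not_or.mp h2
      exact le_trans (le_of_lt (lt_of_not_ge hleo)) (pvSortedHeadMin o ho x hxo)
  · have hmne : m ≠ [] := by rintro rfl; cases hxm
    split_ifs with h
    · rcases h.2 with rfl | hle
      · cases hxm
      · exact le_trans hle (pvSortedHeadMin m hm x hxm)
    · exact pvSortedHeadMin m hm x hxm

theorem pvPopMin_mem (o m : List Int) (h : ¬(o = [] ∧ m = [])) :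
    (pvPopMin o m).1 ∈ o ++ m := by
  rcases pvPopMin_cases o m with ⟨ho, he⟩ | ⟨hm, he⟩ | ⟨rfl, rfl⟩
  · rw [he]
    exact List.mem_append_left _ (by
      rw [List.getD_eq_getElem _ _ (List.length_pos_iff.mpr ho)]; exact List.getElem_mem _)
  · rw [he]
    exact List.mem_append_right _ (by
      rw [List.getD_eq_getElem _ _ (List.length_pos_iff.mpr hm)]; exact List.getElem_mem _)
  · exact absurd ⟨rfl, rfl⟩ h

theorem pvPopMin_perm (o m : List Int) (h : ¬(o = [] ∧ m = [])) :
    ((pvPopMin o m).1 :: ((pvPopMin o m).2.1 ++ (pvPopMin o m).2.2)).Perm (o ++ m) := by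
  rcases pvPopMin_cases o m with ⟨ho, he⟩ | ⟨hm, he⟩ | ⟨rfl, rfl⟩
  · rw [he]
    cases o with
    | nil => exact absurd rfl ho
    | cons a t => simp
  · rw [he]
    cases m with
    | nil => exact absurd rfl hm
    | cons a t =>
      simpa using (List.perm_middle (a := a) (l₁ := o) (l₂ := t)).symm
  · exact absurd ⟨rfl, rfl⟩ h

theorem pvPopMin_sorted (o m : List Int) (ho : o.Pairwise (· ≤ ·)) (hm : m.Pairwise (· ≤ ·)) :
    (pvPopMin o m).2.1.Pairwise (· ≤ ·) ∧ (pvPopMin o m).2.2.Pairwise (· ≤ ·) := by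
  rcases pvPopMin_cases o m with ⟨_, he⟩ | ⟨_, he⟩ | ⟨rfl, rfl⟩
  · rw [he]; exact ⟨ho.sublist (List.tail_sublist o), hm⟩
  · rw [he]; exact ⟨ho, hm.sublist (List.tail_sublist m)⟩
  · simp [pvPopMin]

theorem pvLeGetLast (m : List Int) (hm : m.Pairwise (· ≤ ·)) (y : Int) (hy : y ∈ m)
    (L : Int) (hL : m.getLast? = some L) : y ≤ L := by
  induction m with
  | nil => cases hy
  | cons c t ih =>
    cases t with
    | nil =>
      simp only [List.getLast?_singleton, Option.some.injEq] at hL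
      rcases List.mem_singleton.mp hy with rfl
      omega
    | cons d t' =>
      rw [List.getLast?_cons_cons] at hL
      have hLt : L ∈ d :: t' := by
        have := List.mem_getLast?_eq_getLast (l := d :: t') hL
        exact this.choose_spec ▸ List.getLast_mem _
      rcases List.mem_cons.mp hy with rfl | hyt
      · exact List.rel_of_pairwise_cons hm hLt
      · exact ih (List.pairwise_cons.mp hm).2 hyt hL

theorem pvMemDropLast (m : List Int) (i : Nat) (h : i + 1 < m.length) :
    m.getD i 0 ∈ m.dropLast := by
  rw [List.dropLast_eq_take, List.getD_eq_getElem _ _ (by omega)]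
  exact List.mem_iff_getElem.mpr ⟨i, by simp [List.length_take]; omega,
    by rw [List.getElem_take]⟩

theorem pvTQEq (n : Nat) : ∀ (o m l : List Int) (K ans : Int),
    o.length + m.length = n →
    o.Pairwise (· ≤ ·) → m.Pairwise (· ≤ ·) → l.Pairwise (· ≤ ·) →
    l.Perm (o ++ m) → pvTQInv o m →
    pvTQ o m K ans = pvBLoop l K ans := by
  induction n using Nat.strong_induction_on with
  | _ n ih =>
  intro o m l K ans hlen ho hm hl hperm hinv
  have hleq : l.length = o.length + m.length := by simpa using hperm.length_eq
  have hfront : pvFront o m = l.getD 0 0 := by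
    by_cases hne : o = [] ∧ m = []
    · obtain ⟨rfl, rfl⟩ := hne
      obtain rfl : l = [] := List.length_eq_zero_iff.mp (by simpa using hleq)
      rfl
    · rw [pvFront_eq_popMin]
      refine (pvMinUnique hperm ?_ (pvPopMin_mem o m hne) ?_ (pvPopMin_min o m ho hm)).symm
      · have hl0 : 0 < l.length := by
          rcases Nat.eq_zero_or_pos l.length with h0 | h0
          · exfalso
            apply hne
            constructor <;> [skip; skip] <;>
              · apply List.length_eq_zero_iff.mp; omega
          · exact h0
        rw [List.getD_eq_getElem _ _ hl0]; exact List.getElem_mem _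
      · exact pvSortedHeadMin l hl
  rw [pvTQ, pvBLoop, PySem.List.pyGetD_zero]
  by_cases hg : pvFront o m < K ∧ 2 ≤ o.length + m.length
  · have hgB : l.getD 0 0 < K ∧ 2 ≤ l.length := ⟨by rw [← hfront]; exact hg.1, by omega⟩
    rw [dif_pos hg, dif_pos hgB]
    simp only []
    obtain ⟨b1, b2, rest, rfl⟩ : ∃ b1 b2 rest, l = b1 :: b2 :: rest := by
      match l, hgB.2 with
      | b1 :: b2 :: rest, _ => exact ⟨b1, b2, rest, rfl⟩
    have hne1 : ¬(o = [] ∧ m = []) := by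
      rintro ⟨rfl, rfl⟩; simp at hleq
    -- first pop returns b1
    have hv1 : (pvPopMin o m).1 = b1 := by
      rw [← pvFront_eq_popMin, hfront]; rfl
    have hperm1 : ((pvPopMin o m).2.1 ++ (pvPopMin o m).2.2).Perm (b2 :: rest) := by
      have h' : ((pvPopMin o m).1 :: ((pvPopMin o m).2.1 ++ (pvPopMin o m).2.2)).Perm
          (b1 :: b2 :: rest) := (pvPopMin_perm o m hne1).trans hperm.symm
      rw [hv1] at h'
      exact h'.cons_inv
    obtain ⟨ho1, hm1⟩ := pvPopMin_sorted o m ho hm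
    have hlen1 : (pvPopMin o m).2.1.length + (pvPopMin o m).2.2.length + 1 =
        o.length + m.length := pvPopMin_len o m (by omega)
    have hne2 : ¬((pvPopMin o m).2.1 = [] ∧ (pvPopMin o m).2.2 = []) := by
      rintro ⟨h1, h2⟩
      rw [h1, h2] at hlen1
      simp at hlen1
      omega
    have hstail : (b2 :: rest).Pairwise (· ≤ ·) := (List.pairwise_cons.mp hl).2
    -- second pop returns b2
    have hv2 : (pvPopMin (pvPopMin o m).2.1 (pvPopMin o m).2.2).1 = b2 := by
      refine pvMinUnique hperm1.symm (List.mem_cons_self ..)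
        (pvPopMin_mem _ _ hne2) (by simpa using pvSortedHeadMin _ hstail)
        (pvPopMin_min _ _ ho1 hm1)
        |>.symm
    have hperm2 : ((pvPopMin (pvPopMin o m).2.1 (pvPopMin o m).2.2).2.1 ++
        (pvPopMin (pvPopMin o m).2.1 (pvPopMin o m).2.2).2.2).Perm rest := by
      have h' := (pvPopMin_perm _ _ hne2).trans hperm1
      rw [hv2] at h'
      exact h'.cons_inv
    obtain ⟨ho2, hm2⟩ := pvPopMin_sorted _ _ ho1 hm1
    have hlen2 := pvPopMin_len (pvPopMin o m).2.1 (pvPopMin o m).2.2 (by omega)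
    have hb12 : b1 ≤ b2 := List.rel_of_pairwise_cons hl (List.mem_cons_self ..)
    have hrest_ge : ∀ x ∈ rest, b2 ≤ x := fun x hx =>
      List.rel_of_pairwise_cons hstail hx
    -- the crux: every leftover mix result is ≤ the new mix result b1 + 2*b2
    have hcrux : ∀ y ∈ (pvPopMin (pvPopMin o m).2.1 (pvPopMin o m).2.2).2.2,
        y ≤ b1 + 2 * b2 := by
      intro y hy
      -- m2 is a nonempty pop-suffix of m, so m ≠ [] and Inv's right branch applies
      rcases pvPopMin_cases o m with ⟨hoA, heA⟩ | ⟨hmA, heA⟩ | ⟨rfl, rfl⟩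
      · -- first pop from o: o1 = o.tail, m1 = m
        have hv1' : o.getD 0 0 = b1 := by simp only [heA] at hv1; exact hv1
        rcases pvPopMin_cases o.tail m with ⟨hoB, heB⟩ | ⟨hmB, heB⟩ | ⟨h1, h2⟩
        · -- second pop from o.tail too: m2 = m
          have hy' : y ∈ m := by simp only [heA, heB] at hy; exact hy
          have hv2' : o.tail.getD 0 0 = b2 := by
            simp only [heA, heB] at hv2; exact hv2
          rcases hinv with rfl | ⟨a, b, hL, hab, hge⟩
          · cases hy'
          have hyL : y ≤ a + 2 * b := pvLeGetLast m hm y hy' _ hL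
          have hbv1 : b ≤ b1 := by
            rw [← hv1']
            exact hge _ (List.mem_append_left _ (by
              rw [List.getD_eq_getElem _ _ (List.length_pos_iff.mpr hoA)]
              exact List.getElem_mem _))
          have hbv2 : b ≤ b2 := by
            rw [← hv2']
            exact hge _ (List.mem_append_left _ ((List.tail_sublist o).mem (by
              rw [List.getD_eq_getElem _ _ (List.length_pos_iff.mpr hoB)]
              exact List.getElem_mem _)))
          omega
        · -- second pop from m: m2 = m.tail
          have hy' : y ∈ m.tail := by simp only [heA, heB] at hy; exact hy
          have hv2' : m.getD 0 0 = b2 := by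
            simp only [heA, heB] at hv2; exact hv2
          have hm2' : 2 ≤ m.length := by
            rcases m with _ | ⟨c, t⟩
            · cases hy'
            · rcases t with _ | _
              · cases hy'
              · simp
          rcases hinv with rfl | ⟨a, b, hL, hab, hge⟩
          · simp at hm2'
          have hyL : y ≤ a + 2 * b :=
            pvLeGetLast m hm y ((List.tail_sublist m).mem hy') _ hL
          have hbv1 : b ≤ b1 := by
            rw [← hv1']
            exact hge _ (List.mem_append_left _ (by
              rw [List.getD_eq_getElem _ _ (List.length_pos_iff.mpr hoA)]
              exact List.getElem_mem _))
          have hbv2 : b ≤ b2 := by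
            rw [← hv2']
            exact hge _ (List.mem_append_right _ (pvMemDropLast m 0 (by omega)))
          omega
        · exact absurd ⟨by rw [heA]; exact h1, by rw [heA]; exact h2⟩ hne2
      · -- first pop from m: o1 = o, m1 = m.tail
        have hv1' : m.getD 0 0 = b1 := by simp only [heA] at hv1; exact hv1
        rcases pvPopMin_cases o m.tail with ⟨hoB, heB⟩ | ⟨hmB, heB⟩ | ⟨h1, h2⟩
        · -- second pop from o: m2 = m.tail
          have hy' : y ∈ m.tail := by simp only [heA, heB] at hy; exact hy
          have hv2' : o.getD 0 0 = b2 := by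
            simp only [heA, heB] at hv2; exact hv2
          have hm2' : 2 ≤ m.length := by
            rcases m with _ | ⟨c, t⟩
            · exact absurd rfl hmA
            · rcases t with _ | _
              · cases hy'
              · simp
          rcases hinv with rfl | ⟨a, b, hL, hab, hge⟩
          · exact absurd rfl hmA
          have hyL : y ≤ a + 2 * b :=
            pvLeGetLast m hm y ((List.tail_sublist m).mem hy') _ hL
          have hbv1 : b ≤ b1 := by
            rw [← hv1']
            exact hge _ (List.mem_append_right _ (pvMemDropLast m 0 (by omega)))
          have hbv2 : b ≤ b2 := by
            rw [← hv2']
            exact hge _ (List.mem_append_left _ (by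
              rw [List.getD_eq_getElem _ _ (List.length_pos_iff.mpr hoB)]
              exact List.getElem_mem _))
          omega
        · -- second pop from m.tail: m2 = m.tail.tail
          have hy' : y ∈ m.tail.tail := by simp only [heA, heB] at hy; exact hy
          have hv2' : m.tail.getD 0 0 = b2 := by
            simp only [heA, heB] at hv2; exact hv2
          have hm3' : 3 ≤ m.length := by
            rcases m with _ | ⟨c, t⟩
            · exact absurd rfl hmA
            · rcases t with _ | ⟨d, t'⟩
              · cases hy'
              · rcases t' with _ | _
                · cases hy'
                · simp
          rcases hinv with rfl | ⟨a, b, hL, hab, hge⟩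
          · exact absurd rfl hmA
          have hyL : y ≤ a + 2 * b :=
            pvLeGetLast m hm y ((List.tail_sublist m).mem
              ((List.tail_sublist m.tail).mem hy')) _ hL
          have hbv1 : b ≤ b1 := by
            rw [← hv1']
            exact hge _ (List.mem_append_right _ (pvMemDropLast m 0 (by omega)))
          have hbv2 : b ≤ b2 := by
            rw [← hv2']
            have htail : m.tail.getD 0 0 = m.getD 1 0 := by
              rcases m with _ | ⟨c, t⟩
              · rfl
              · rfl
            rw [htail]
            exact hge _ (List.mem_append_right _ (pvMemDropLast m 1 (by omega)))
          omega
        · exact absurd ⟨by rw [heA]; exact h1, by rw [heA]; exact h2⟩ hne2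
      · exact absurd ⟨rfl, rfl⟩ hne1
    -- assemble the recursive step
    have hfst : PySem.List.pyGetD (b1 :: b2 :: rest) 1 0 = b2 := by
      have h1 : (1 : Int) = ((1 : Nat) : Int) := rfl
      rw [h1, PySem.List.pyGetD_natCast]
      rfl
    have hdrop : (b1 :: b2 :: rest).drop 2 = rest := rfl
    rw [hfst, hdrop]
    show pvTQ _ (_ ++ [(pvPopMin o m).1 + 2 * (pvPopMin (pvPopMin o m).2.1 (pvPopMin o m).2.2).1]) K (ans + 1) = _
    rw [hv1, hv2]
    have hx : b1 + 2 * b2 = b1 + b2 * 2 := by ring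
    apply ih (n - 1) (by omega)
    · simp only [List.length_append, List.length_cons, List.length_nil]
      omega
    · exact ho2
    · -- new mix queue sorted: m2 sorted, everything in m2 ≤ new last
      rw [List.pairwise_append]
      exact ⟨hm2, List.pairwise_singleton _ _, fun a ha b hb => by
        rcases List.mem_singleton.mp hb with rfl
        exact hcrux a ha⟩
    · exact pvInsort_sorted rest _ (List.pairwise_cons.mp hstail).2
    · refine (pvInsort_perm rest (b1 + b2 * 2)).trans ?_
      rw [← hx]
      refine ((hperm2.cons (b1 + 2 * b2)).symm).trans ?_
      rw [← List.append_assoc]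
      exact (List.perm_append_singleton _ _).symm
    · -- the invariant after the step
      refine Or.inr ⟨b1, b2, ?_, hb12, ?_⟩
      · simp
      · rw [List.dropLast_concat]
        intro x hx'
        exact hrest_ge x (hperm2.mem_iff.mp hx')
  · have hgB : ¬(l.getD 0 0 < K ∧ 2 ≤ l.length) := by rw [← hfront]; omega
    rw [dif_neg hg, dif_neg hgB, hfront]


-- ===== bridge: the fuel/index port equals the suffix-list loop =====
theorem pvDropGetD (l : List Int) (i : Nat) : (l.drop i).getD 0 0 = l.getD i 0 := by
  rcases Nat.lt_or_ge i l.length with h | h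
  · rw [List.getD_eq_getElem _ _ (by simp only [List.length_drop]; omega),
      List.getD_eq_getElem _ _ h]
    simp
  · have h2 : l.getD i 0 = 0 := by
      rw [List.getD_eq_getElem?_getD, List.getElem?_eq_none_iff.mpr (by omega)]
      rfl
    rw [List.drop_eq_nil_of_le h, h2]
    rfl

theorem pvDropNil (l : List Int) (i : Nat) (hi : i ≤ l.length) :
    l.drop i = [] ↔ i = l.length := by
  rw [List.drop_eq_nil_iff]; omega

theorem pvFrontI_eq (orig mixed : List Int) (i j : Nat) (hi : i ≤ orig.length)
    (hj : j ≤ mixed.length) :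
    pvFrontI orig mixed i j = pvFront (orig.drop i) (mixed.drop j) := by
  unfold pvFrontI pvFront
  rw [pvDropGetD, pvDropGetD]
  by_cases h1 : i = orig.length
  · rw [if_pos h1, if_pos ((pvDropNil orig i hi).mpr h1)]
  · rw [if_neg h1, if_neg (fun hc => h1 ((pvDropNil orig i hi).mp hc))]
    by_cases h2 : j = mixed.length
    · rw [if_pos h2, if_pos ((pvDropNil mixed j hj).mpr h2)]
    · rw [if_neg h2, if_neg (fun hc => h2 ((pvDropNil mixed j hj).mp hc))]

theorem pvPopI_eq (orig mixed : List Int) (i j : Nat) (hi : i ≤ orig.length)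
    (hj : j ≤ mixed.length) (hne : ¬(orig.drop i = [] ∧ mixed.drop j = [])) :
    (pvPopI orig mixed i j).1 = (pvPopMin (orig.drop i) (mixed.drop j)).1 ∧
    (pvPopI orig mixed i j).2.1 ≤ orig.length ∧
    (pvPopI orig mixed i j).2.2 ≤ mixed.length ∧
    orig.drop (pvPopI orig mixed i j).2.1 = (pvPopMin (orig.drop i) (mixed.drop j)).2.1 ∧
    mixed.drop (pvPopI orig mixed i j).2.2 = (pvPopMin (orig.drop i) (mixed.drop j)).2.2 ∧
    (pvPopI orig mixed i j).2.1 + (pvPopI orig mixed i j).2.2 = i + j + 1 := by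
  unfold pvPopI pvPopMin
  by_cases hc : i < orig.length ∧ (j = mixed.length ∨ orig.getD i 0 ≤ mixed.getD j 0)
  · have hc' : orig.drop i ≠ [] ∧ (mixed.drop j = [] ∨
        (orig.drop i).getD 0 0 ≤ (mixed.drop j).getD 0 0) := by
      refine ⟨fun h => by rw [(pvDropNil orig i hi).mp h] at hc; omega, ?_⟩
      rcases hc.2 with h | h
      · exact Or.inl ((pvDropNil mixed j hj).mpr h)
      · exact Or.inr (by rw [pvDropGetD, pvDropGetD]; exact h)
    rw [if_pos hc, if_pos hc']
    refine ⟨(pvDropGetD ..).symm, ?_, ?_, ?_, rfl, ?_⟩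
    · show i + 1 ≤ orig.length
      omega
    · show j ≤ mixed.length
      exact hj
    · show orig.drop (i + 1) = (orig.drop i).tail
      rw [List.tail_drop]
    · show i + 1 + j = i + j + 1
      omega
  · have hsplit : i = orig.length ∨
        (i < orig.length ∧ j ≠ mixed.length ∧ ¬ orig.getD i 0 ≤ mixed.getD j 0) := by
      by_cases h1 : i < orig.length
      · right
        refine ⟨h1, ?_, ?_⟩ <;> (intro h2; exact hc ⟨h1, by tauto⟩)
      · left; omega
    have hjlt : j < mixed.length := by
      rcases hsplit with h1 | ⟨_, h2, _⟩
      · rcases Nat.lt_or_ge j mixed.length with h | h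
        · exact h
        · exact absurd ⟨List.drop_eq_nil_of_le (by omega),
            List.drop_eq_nil_of_le h⟩ hne
      · omega
    have hc' : ¬(orig.drop i ≠ [] ∧ (mixed.drop j = [] ∨
        (orig.drop i).getD 0 0 ≤ (mixed.drop j).getD 0 0)) := by
      rcases hsplit with h1 | ⟨h1, h2, h3⟩
      · intro h
        exact h.1 (List.drop_eq_nil_of_le (by omega))
      · intro h
        rcases h.2 with h4 | h4
        · exact h2 ((pvDropNil mixed j hj).mp h4)
        · rw [pvDropGetD, pvDropGetD] at h4
          exact h3 h4
    rw [if_neg hc, if_neg hc']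
    refine ⟨(pvDropGetD ..).symm, ?_, ?_, rfl, ?_, ?_⟩
    · show i ≤ orig.length
      exact hi
    · show j + 1 ≤ mixed.length
      omega
    · show mixed.drop (j + 1) = (mixed.drop j).tail
      rw [List.tail_drop]
    · show i + (j + 1) = i + j + 1
      omega

theorem pvDropAppend (mixed : List Int) (x : Int) (k : Nat) (hk : k ≤ mixed.length) :
    (mixed ++ [x]).drop k = mixed.drop k ++ [x] := by
  exact List.drop_append_of_le_length hk

theorem pvTQIEq (fuel : Nat) : ∀ (orig mixed : List Int) (i j : Nat) (K ans : Int),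
    i ≤ orig.length → j ≤ mixed.length →
    (orig.length - i) + (mixed.length - j) < fuel →
    pvTQI fuel orig mixed i j K ans = pvTQ (orig.drop i) (mixed.drop j) K ans := by
  induction fuel with
  | zero => intro orig mixed i j K ans _ _ h; omega
  | succ fuel ih =>
    intro orig mixed i j K ans hi hj hf
    have hfr := pvFrontI_eq orig mixed i j hi hj
    have hlen : (orig.length - i) + (mixed.length - j) =
        (orig.drop i).length + (mixed.drop j).length := by
      simp only [List.length_drop]
    rw [pvTQI, pvTQ]
    by_cases hg : pvFrontI orig mixed i j < K ∧
        2 ≤ (orig.length - i) + (mixed.length - j)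
    · rw [if_pos hg, dif_pos (by rw [← hfr, ← hlen]; exact hg)]
      simp only []
      have hne1 : ¬(orig.drop i = [] ∧ mixed.drop j = []) := by
        rintro ⟨h1, h2⟩
        rw [h1, h2] at hlen
        simp only [List.length_nil] at hlen
        omega
      obtain ⟨e1, hi1, hj1, d1, d2, hs1⟩ := pvPopI_eq orig mixed i j hi hj hne1
      have hlen1 := pvPopMin_len (orig.drop i) (mixed.drop j) (by omega)
      have hne2 : ¬(orig.drop (pvPopI orig mixed i j).2.1 = [] ∧
          mixed.drop (pvPopI orig mixed i j).2.2 = []) := by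
        rintro ⟨h1, h2⟩
        rw [d1] at h1
        rw [d2] at h2
        rw [h1, h2] at hlen1
        simp only [List.length_nil] at hlen1
        omega
      obtain ⟨e2, hi2, hj2, d3, d4, hs2⟩ :=
        pvPopI_eq orig mixed (pvPopI orig mixed i j).2.1 (pvPopI orig mixed i j).2.2
          hi1 hj1 hne2
      rw [← d1, ← d2, ← d3, ← d4, ← e1, ← e2, ← pvDropAppend mixed _ _ hj2]
      exact ih orig _ _ _ K (ans + 1) hi2
        (by rw [List.length_append]; simp only [List.length_cons, List.length_nil]; omega)
        (by rw [List.length_append]; simp only [List.length_cons, List.length_nil]; omega)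
    · rw [if_neg hg, dif_neg (by rw [← hfr, ← hlen]; exact hg), hfr]

-- ===== VERDICT (by name: the statement is the Claim_ definition above) =====
theorem solution_spec : Claim_equal_solution := by
  unfold Claim_equal_solution
  intro scoville K _ _
  unfold Spec_solution solution solution_alt
  have hb := pvBuild scoville [] (by intro j hj0 hj; simp at hj)
  have hpw : (PySem.List.sorted scoville id).Pairwise (· ≤ ·) := by
    simpa using PySem.List.sorted_pairwise scoville id
  have hperm : (scoville.foldl pvHeappush []).Perm scoville := by simpa using hb.2
  have hA : pvALoop (scoville.foldl pvHeappush []) K 0 =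
      pvBLoop (PySem.List.sorted scoville id) K 0 :=
    pvLoopEq (scoville.foldl pvHeappush []).length _ _ K 0 rfl hb.1 hpw
      (hperm.trans (PySem.List.sorted_perm scoville id false).symm)
  have hB : pvTQ (PySem.List.sorted scoville id) [] K 0 =
      pvBLoop (PySem.List.sorted scoville id) K 0 := by
    apply pvTQEq ((PySem.List.sorted scoville id).length + ([] : List Int).length)
      _ _ _ K 0 rfl hpw List.Pairwise.nil hpw (by simp) (Or.inl rfl)
  have hI : pvTQI (scoville.length + 1) (PySem.List.sorted scoville id) [] 0 0 K 0 =
      pvTQ (PySem.List.sorted scoville id) [] K 0 := by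
    have := pvTQIEq (scoville.length + 1) (PySem.List.sorted scoville id) [] 0 0 K 0
      (by omega) (by omega)
      (by rw [PySem.List.length_sorted]; simp)
    simpa using this
  rw [hA, hI, hB]
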